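-- pv_equiv track=rewrite | github.com/reisenx/2110101-COM-PROG | 09-Nested-Structure/09_MoreDC_34/09_MoreDC_34.py | pattern5
-- ===== SOURCE A (Python) =====
-- def pattern5(N):
--     # Create N x N matrix
--     matrix = []
--     for i in range(N):
--         # Add 0 before adding a number
--         row = [0]*i
--         # Calculate numbers after 0
--         num = i+1
--         for j in range(N, i, -1):
--             row.append(num)
--             num += j
--         # Add each row to a matrix
--         matrix.append(row)
--     return matrix
-- ===== SOURCE B (Python) =====
-- def pattern5(N):
--     # Each entry computed directly from its indices (closed form), no running accumulator.
--     return [[0] * i + [i + 1 + k * N - k * (k - 1) // 2 for k in range(N - i)]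
--             for i in range(N)]
-- ===== Notes on version B (the rewrite author's own statement) =====
-- stated objective: alternative
-- what changed: Replaces the running-accumulator inner loop (num += j over a countdown range) with a direct closed-form expression in the row and column indices, computed independently per nonzero entry via a comprehension.
import Mathlib
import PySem

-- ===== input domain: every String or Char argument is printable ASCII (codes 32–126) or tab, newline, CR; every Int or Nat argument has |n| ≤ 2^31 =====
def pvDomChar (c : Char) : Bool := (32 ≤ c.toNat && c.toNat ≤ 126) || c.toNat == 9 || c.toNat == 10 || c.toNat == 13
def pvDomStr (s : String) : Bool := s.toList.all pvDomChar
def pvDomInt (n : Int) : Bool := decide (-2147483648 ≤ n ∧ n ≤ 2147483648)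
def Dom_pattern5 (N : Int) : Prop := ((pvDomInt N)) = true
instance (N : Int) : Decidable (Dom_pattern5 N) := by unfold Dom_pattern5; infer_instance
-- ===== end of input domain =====

-- B replaces A's running accumulator with a per-entry closed-form formula; same O(N^2) cost.

-- ===== PORT A =====
def pattern5 (N : Int) : List (List Int) :=
  (PySem.List.pyRange 0 N 1).foldl (fun matrix i =>
    let row : List Int := PySem.List.pyRepeat [(0 : Int)] i
    let s := (PySem.List.pyRange N i (-1)).foldl
      (fun (s : List Int × Int) j => (s.1 ++ [s.2], s.2 + j)) (row, i + 1)
    matrix ++ [s.1]) []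

-- ===== PORT B =====
def pattern5_alt (N : Int) : List (List Int) :=
  (PySem.List.pyRange 0 N 1).map (fun i =>
    PySem.List.pyRepeat [(0 : Int)] i ++
      (PySem.List.pyRange 0 (N - i) 1).map (fun k =>
        i + 1 + k * N - PySem.Int.floordiv (k * (k - 1)) 2))

-- ===== PRECONDITION & SPEC =====
def Spec_pattern5 (N : Int) (out : List (List Int)) : Prop := out = pattern5_alt N
instance (N : Int) (out : List (List Int)) : Decidable (Spec_pattern5 N out) := by unfold Spec_pattern5; infer_instance

-- ===== CLAIM (what is proved, stated in full; the proofs are below) =====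
def Claim_equal_pattern5 : Prop := ∀ (N : Int), Dom_pattern5 N → Spec_pattern5 N (pattern5 N)

-- ===== LEMMAS AND PROOFS =====

-- The accumulator fold emits, at position k, the start value plus the sum of the first k increments.
theorem fold_emit (js : List Int) (row : List Int) (a : Int) :
    (js.foldl (fun (s : List Int × Int) j => (s.1 ++ [s.2], s.2 + j)) (row, a)).1
      = row ++ (List.range js.length).map (fun k => a + ((js.take k).sum)) := by
  induction js generalizing row a with
  | nil => simp
  | cons j js ih =>
    simp only [List.foldl_cons, ih, List.length_cons, List.range_succ_eq_map, List.map_cons,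
      List.map_map, Function.comp_def, List.take_succ_cons, List.sum_cons, List.take_zero,
      List.sum_nil, add_zero, List.append_assoc, List.singleton_append]
    congr 2
    apply List.map_congr_left
    intro k _
    ring

-- Sum of the first k increments of the countdown sequence N, N-1, … equals k*N - k*(k-1)//2.
theorem take_sum_countdown (N : Int) (n k : Nat) (hk : k ≤ n) :
    ((((List.range n).map (fun t : Nat => N - (t : Int))).take k).sum)
      = (k : Int) * N - PySem.Int.floordiv ((k : Int) * ((k : Int) - 1)) 2 := by
  induction k with
  | zero => simp [PySem.Int.floordiv]
  | succ k ih =>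
    have hkn : k ≤ n := Nat.le_of_succ_le hk
    rw [List.take_add_one, List.sum_append]
    have hget : (((List.range n).map (fun t : Nat => N - (t : Int)))[k]?) = some (N - (k : Int)) := by
      rw [List.getElem?_map, List.getElem?_range (by omega)]
      rfl
    rw [hget, ih hkn]
    simp only [Option.toList_some, List.sum_singleton]
    have h1 : PySem.Int.floordiv ((k : Int) * ((k : Int) - 1)) 2
        = ((k : Int) * ((k : Int) - 1)) / 2 := PySem.Int.floordiv_eq_ediv_of_pos (by omega)
    have h2 : PySem.Int.floordiv (((k + 1 : Nat) : Int) * (((k + 1 : Nat) : Int) - 1)) 2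
        = (((k + 1 : Nat) : Int) * (((k + 1 : Nat) : Int) - 1)) / 2 :=
      PySem.Int.floordiv_eq_ediv_of_pos (by omega)
    have heven : ∃ m : Int, (k : Int) * ((k : Int) - 1) = 2 * m := by
      rcases Int.even_or_odd (k : Int) with ⟨m, hm⟩ | ⟨m, hm⟩
      · exact ⟨m * ((k : Int) - 1), by rw [hm]; ring⟩
      · exact ⟨(k : Int) * m, by rw [hm]; ring⟩
    obtain ⟨m, hm⟩ := heven
    have hm' : (((k + 1 : Nat) : Int)) * ((((k + 1 : Nat) : Int)) - 1) = 2 * (m + k) := by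
      push_cast; push_cast at hm; nlinarith [hm]
    rw [h1, h2, hm, hm']
    rw [Int.mul_ediv_cancel_left _ (by norm_num), Int.mul_ediv_cancel_left _ (by norm_num)]
    push_cast
    ring

-- One row: A's inner accumulator loop equals B's closed-form comprehension (for 0 ≤ i).
theorem row_eq (N i : Int) :
    ((PySem.List.pyRange N i (-1)).foldl
      (fun (s : List Int × Int) j => (s.1 ++ [s.2], s.2 + j))
      (PySem.List.pyRepeat [(0 : Int)] i, i + 1)).1
      = PySem.List.pyRepeat [(0 : Int)] i ++
          (PySem.List.pyRange 0 (N - i) 1).map (fun k =>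
            i + 1 + k * N - PySem.Int.floordiv (k * (k - 1)) 2) := by
  rw [PySem.List.pyRange_neg_one, fold_emit]
  congr 1
  rw [PySem.List.pyRange_one]
  simp only [List.length_map, List.length_range, List.map_map, sub_zero]
  apply List.map_congr_left
  intro k hk
  have hkn : k < (N - i).toNat := List.mem_range.mp hk
  simp only [Function.comp]
  rw [take_sum_countdown N (N - i).toNat k (Nat.le_of_lt hkn)]
  simp only [zero_add]
  ring

-- ===== VERDICT (by name: the statement is the Claim_ definition above) =====
theorem pattern5_spec : Claim_equal_pattern5 := by
  intro N _
  unfold Spec_pattern5 pattern5 pattern5_alt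
  rw [PySem.List.foldl_append_singleton_eq_map, List.nil_append]
  apply List.map_congr_left
  intro i _
  exact row_eq N i
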